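-- pv_equiv track=rewrite | github.com/shaf-aston/FYP-sales-training-tool | training/data/data_processing_scripts/to convert raw/process_text.py | group_into_conversations
-- ===== SOURCE A (Python) =====
-- def group_into_conversations(segments, min_exchanges=3):
--     """Group segments into meaningful conversations"""
--     conversations = []
--     current_conversation = []
--
--     for segment in segments:
--         current_conversation.append(segment)
--
--         greeting_patterns = ["hi", "hello", "good morning", "good afternoon", "thanks for"]
--         if (segment["role"] == "assistant" and
--             any(pattern in segment["content"].lower() for pattern in greeting_patterns) and
--             len(current_conversation) > min_exchanges):
--             conversations.append(current_conversation)
--             current_conversation = [segment]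
--
--     if len(current_conversation) >= min_exchanges:
--         conversations.append(current_conversation)
--
--     return conversations
-- ===== SOURCE B (Python) =====
-- def group_into_conversations(segments, min_exchanges=3):
--     """Group segments into conversations, tracking a start index instead of accumulating a list."""
--     greeting_patterns = ["hi", "hello", "good morning", "good afternoon", "thanks for"]
--     conversations = []
--     start = 0
--     for i, segment in enumerate(segments):
--         if (segment["role"] == "assistant"
--                 and any(p in segment["content"].lower() for p in greeting_patterns)
--                 and i - start + 1 > min_exchanges):
--             conversations.append(segments[start:i + 1])
--             start = i
--     if len(segments) - start >= min_exchanges: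
--         conversations.append(segments[start:])
--     return conversations
-- ===== Notes on version B (the rewrite author's own statement) =====
-- stated objective: alternative
-- what changed: B replaces A's accumulated current_conversation list with a start index over enumerate(segments), emitting conversations as slices segments[start:i+1] / segments[start:] instead of growing and resetting a list.
import Mathlib
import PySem

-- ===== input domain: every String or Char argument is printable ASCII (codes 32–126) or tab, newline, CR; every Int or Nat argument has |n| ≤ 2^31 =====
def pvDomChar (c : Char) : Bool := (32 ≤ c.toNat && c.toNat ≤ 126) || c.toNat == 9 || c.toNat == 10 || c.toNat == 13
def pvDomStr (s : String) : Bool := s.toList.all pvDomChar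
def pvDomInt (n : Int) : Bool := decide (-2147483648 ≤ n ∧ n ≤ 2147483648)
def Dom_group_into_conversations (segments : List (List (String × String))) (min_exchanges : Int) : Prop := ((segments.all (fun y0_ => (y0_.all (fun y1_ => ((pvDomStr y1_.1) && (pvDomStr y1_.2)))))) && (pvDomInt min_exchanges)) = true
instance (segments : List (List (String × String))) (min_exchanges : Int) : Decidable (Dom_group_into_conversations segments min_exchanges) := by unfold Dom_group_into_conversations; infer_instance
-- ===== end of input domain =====

-- B tracks a start index over enumerate(segments) and emits slices, instead of A's
-- accumulate-and-reset current_conversation list; equivalence of return values is proved on Pre_.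


-- ===== PORT A =====
-- the textually identical split test of both Pythons: segment["role"] == "assistant"
-- and any(pattern in segment["content"].lower() for pattern in greeting_patterns)
def pvSplitSeg (seg : List (String × String)) : Bool :=
  ((PySem.Dict.get? (PySem.Dict.mk seg) "role").getD "" == "assistant")
  && (["hi", "hello", "good morning", "good afternoon", "thanks for"].any
       (fun p => PySem.Str.isIn p (PySem.Str.lower ((PySem.Dict.get? (PySem.Dict.mk seg) "content").getD ""))))

-- A's loop body: append segment to current_conversation, close it on a qualifying greeting
def pvStepA (min_exchanges : Int)
    (st : List (List (List (String × String))) × List (List (String × String)))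
    (segment : List (String × String)) :
    List (List (List (String × String))) × List (List (String × String)) :=
  let cur := st.2 ++ [segment]
  if pvSplitSeg segment && decide (min_exchanges < (cur.length : Int)) then
    (st.1 ++ [cur], [segment])
  else
    (st.1, cur)

-- A's final flush of current_conversation
def pvFinA (min_exchanges : Int)
    (st : List (List (List (String × String))) × List (List (String × String))) :
    List (List (List (String × String))) :=
  if min_exchanges ≤ (st.2.length : Int) then st.1 ++ [st.2] else st.1

def group_into_conversations (segments : List (List (String × String))) (min_exchanges : Int) : List (List (List (String × String))) :=
  pvFinA min_exchanges (segments.foldl (pvStepA min_exchanges) ([], []))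

-- ===== PORT B =====
-- B's loop body: on a qualifying greeting at index i, emit the slice segments[start:i+1]
def pvStepB (segments : List (List (String × String))) (min_exchanges : Int)
    (st : List (List (List (String × String))) × Int) (p : Int × List (String × String)) :
    List (List (List (String × String))) × Int :=
  if pvSplitSeg p.2 && decide (min_exchanges < p.1 - st.2 + 1) then
    (st.1 ++ [PySem.List.slice segments (some st.2) (some (p.1 + 1))], p.1)
  else
    st

-- B's final flush: segments[start:] when enough segments remain
def pvFinB (segments : List (List (String × String))) (min_exchanges : Int)
    (st : List (List (List (String × String))) × Int) :
    List (List (List (String × String))) :=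
  if min_exchanges ≤ (segments.length : Int) - st.2 then
    st.1 ++ [PySem.List.slice segments (some st.2) none]
  else
    st.1

def group_into_conversations_alt (segments : List (List (String × String))) (min_exchanges : Int) : List (List (List (String × String))) :=
  pvFinB segments min_exchanges
    ((PySem.List.enumerate segments).foldl (pvStepB segments min_exchanges) ([], 0))

-- ===== PRECONDITION & SPEC =====
-- Pre_ excludes exactly the inputs where Python A raises KeyError: a segment without a
-- "role" key, or an assistant segment without a "content" key.
def Pre_group_into_conversations (segments : List (List (String × String))) (min_exchanges : Int) : Prop :=
  ∀ seg ∈ segments,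
    (PySem.Dict.get? (PySem.Dict.mk seg) "role").isSome = true ∧
    (PySem.Dict.get? (PySem.Dict.mk seg) "role" = some "assistant" →
      (PySem.Dict.get? (PySem.Dict.mk seg) "content").isSome = true)
instance (segments : List (List (String × String))) (min_exchanges : Int) : Decidable (Pre_group_into_conversations segments min_exchanges) := by unfold Pre_group_into_conversations; infer_instance

def pvWitness_group_into_conversations : (List (List (String × String))) × Int :=
  ([[("role", "user"), ("content", "hi")], [("role", "assistant"), ("content", "Hello!")]], 1)

def Spec_group_into_conversations (segments : List (List (String × String))) (min_exchanges : Int) (out : List (List (List (String × String)))) : Prop := out = group_into_conversations_alt segments min_exchanges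
instance (segments : List (List (String × String))) (min_exchanges : Int) (out : List (List (List (String × String)))) : Decidable (Spec_group_into_conversations segments min_exchanges out) := by unfold Spec_group_into_conversations; infer_instance

-- ===== CLAIM (what is proved, stated in full; the proofs are below) =====
def Claim_equal_group_into_conversations : Prop := ∀ (segments : List (List (String × String))) (min_exchanges : Int), Dom_group_into_conversations segments min_exchanges → Pre_group_into_conversations segments min_exchanges → Spec_group_into_conversations segments min_exchanges (group_into_conversations segments min_exchanges)

-- ===== LEMMAS AND PROOFS =====

-- loop invariant: A's current_conversation is exactly segments[start:i] (= pre.drop start,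
-- i = pre.length), and the emitted conversation lists coincide
theorem group_into_conversations_main (segments : List (List (String × String))) (min_exchanges : Int) :
    ∀ (rest pre : List (List (String × String)))
      (convs : List (List (List (String × String)))) (start : Nat),
      start ≤ pre.length → segments = pre ++ rest →
      pvFinA min_exchanges (rest.foldl (pvStepA min_exchanges) (convs, pre.drop start))
      = pvFinB segments min_exchanges
          ((PySem.List.enumerate rest (pre.length : Int)).foldl
            (pvStepB segments min_exchanges) (convs, (start : Int))) := by
  intro rest
  induction rest with
  | nil =>
    intro pre convs start hs hseg
    simp only [List.foldl_nil, PySem.List.enumerate_nil]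
    have h1 : PySem.List.slice segments (some (start : Int)) none = pre.drop start := by
      rw [PySem.List.slice_from_natCast, hseg, List.append_nil]
    have h2 : (((pre.drop start).length : Nat) : Int) = (segments.length : Int) - (start : Int) := by
      rw [hseg]; simp; omega
    unfold pvFinA pvFinB
    rw [h1, h2]
  | cons seg rest ih =>
    intro pre convs start hs hseg
    rw [PySem.List.enumerate_cons, List.foldl_cons, List.foldl_cons]
    have hlen1 : (((pre.drop start ++ [seg]).length : Nat) : Int)
        = (pre.length : Int) - (start : Int) + 1 := by
      simp; omega
    have hcast : ((pre.length : Int) + 1) = (((pre.length + 1 : Nat)) : Int) := by push_cast; ring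
    by_cases hb : (pvSplitSeg seg && decide (min_exchanges < (pre.length : Int) - (start : Int) + 1)) = true
    · have ha : (pvSplitSeg seg
          && decide (min_exchanges < (((pre.drop start ++ [seg]).length : Nat) : Int))) = true := by
        rw [hlen1]; exact hb
      have hA : pvStepA min_exchanges (convs, pre.drop start) seg
          = (convs ++ [pre.drop start ++ [seg]], [seg]) := by
        unfold pvStepA; rw [if_pos ha]
      have hslice : PySem.List.slice segments (some (start : Int)) (some ((pre.length : Int) + 1))
          = pre.drop start ++ [seg] := by
        rw [hcast, PySem.List.slice_natCast, hseg, List.drop_append_of_le_length hs]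
        have h1 : pre.length + 1 - start = (pre.drop start).length + 1 := by simp; omega
        rw [h1, List.take_append]
        simp
      have hB : pvStepB segments min_exchanges (convs, (start : Int)) ((pre.length : Int), seg)
          = (convs ++ [pre.drop start ++ [seg]], (pre.length : Int)) := by
        unfold pvStepB; rw [if_pos hb, hslice]
      rw [hA, hB]
      have := ih (pre ++ [seg]) (convs ++ [pre.drop start ++ [seg]]) pre.length
        (by simp) (by rw [hseg]; simp)
      rw [List.drop_left, List.length_append, List.length_cons, List.length_nil,
        Nat.zero_add] at this
      rw [show ((pre.length : Int)) = (((pre.length : Nat)) : Int) from rfl, hcast]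
      exact this
    · have ha : (pvSplitSeg seg
          && decide (min_exchanges < (((pre.drop start ++ [seg]).length : Nat) : Int))) = false := by
        rw [hlen1]; exact (Bool.not_eq_true _).mp hb
      have hA : pvStepA min_exchanges (convs, pre.drop start) seg
          = (convs, pre.drop start ++ [seg]) := by
        unfold pvStepA; rw [if_neg ((Bool.not_eq_true _).mpr ha)]
      have hB : pvStepB segments min_exchanges (convs, (start : Int)) ((pre.length : Int), seg)
          = (convs, (start : Int)) := by
        unfold pvStepB; rw [if_neg hb]
      rw [hA, hB]
      have := ih (pre ++ [seg]) convs start (by simp; omega) (by rw [hseg]; simp)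
      rw [List.drop_append_of_le_length hs, List.length_append, List.length_cons,
        List.length_nil, Nat.zero_add] at this
      rw [hcast]
      exact this

-- ===== VERDICT (by name: the statement is the Claim_ definition above) =====
theorem group_into_conversations_spec : Claim_equal_group_into_conversations := by
  intro segments min_exchanges _ _
  unfold Spec_group_into_conversations group_into_conversations group_into_conversations_alt
  have := group_into_conversations_main segments min_exchanges segments [] [] 0
    (by simp) (by simp)
  simpa using this
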